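-- pv_equiv track=rewrite | github.com/Lewington-pitsos/lanenet-lane-detection | rmask.py | interpolate_gaps
-- ===== SOURCE A (Python) =====
-- def interpolate_gaps(indices):
--     prev = 0
--     last_proper_index = 0
--     currently_bad = False
--     new_indices = []
--
--     for index, val in enumerate(indices):
--         if val > 0:
--             if currently_bad:
--                 mean_value = int((prev + val) / 2) if prev > 0 else val
--                 for i in range(index - last_proper_index - 1):
--                     new_indices.append(mean_value)
--
--             currently_bad = False
--             last_proper_index = index
--             prev = val
--             new_indices.append(val)
--         else:
--             currently_bad = True
--
--     return new_indices
-- ===== SOURCE B (Python) =====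
-- def interpolate_gaps(indices):
--     # Pass 1 (backward): nxt[j] = the nearest positive value at or after position j (0 if none).
--     nxt = []
--     following = 0
--     for v in reversed(indices):
--         if v > 0:
--             following = v
--         nxt.append(following)
--     nxt.reverse()
--     # Pass 2 (forward, per position): each position yields its own output element directly.
--     out = []
--     prev = 0
--     for j, (v, f) in enumerate(zip(indices, nxt)):
--         if v > 0:
--             prev = v
--             out.append(v)
--         elif j > 0 and f > 0:
--             out.append((prev + f) // 2 if prev > 0 else f)
--     return out
-- ===== Notes on version B (the rewrite author's own statement) =====
-- stated objective: alternative
-- what changed: Replaces A's event-driven single pass (currently_bad flag, counted block of midpoint appends at each positive) with a two-pass per-position scheme: a backward scan precomputes nxt[j] = nearest positive value at or after j, then a forward pass emits exactly one output element per position directly from (prev, nxt[j]) with no gap counting or replicated blocks.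
import Mathlib
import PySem

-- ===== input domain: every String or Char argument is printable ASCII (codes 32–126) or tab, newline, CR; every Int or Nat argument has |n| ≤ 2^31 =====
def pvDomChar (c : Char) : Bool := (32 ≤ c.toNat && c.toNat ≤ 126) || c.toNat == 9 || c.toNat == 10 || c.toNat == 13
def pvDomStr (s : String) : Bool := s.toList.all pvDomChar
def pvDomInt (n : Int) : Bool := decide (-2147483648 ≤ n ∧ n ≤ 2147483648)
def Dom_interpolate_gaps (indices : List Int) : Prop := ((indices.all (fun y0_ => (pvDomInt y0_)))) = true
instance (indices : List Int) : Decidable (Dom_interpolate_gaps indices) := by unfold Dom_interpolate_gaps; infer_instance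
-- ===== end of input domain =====

-- B replaces A's flag-driven gap-counting pass by a backward precomputation of the next positive
-- value per position followed by a direct per-position forward pass; objective: alternative, same value.

-- ===== PORT A =====
-- state: (prev, last_proper_index, currently_bad, new_indices); the inner
-- `for i in range(index - last_proper_index - 1)` of appends is ported as appending
-- List.replicate (…).toNat (empty for a nonpositive count, exactly like range).
-- `int((prev + val) / 2)`: here prev > 0, val > 0 and both ≤ 2^31, so the float division is
-- exact and int-truncation equals floor: PySem.Int.floordiv is exact on this domain.
def interpolate_gaps (indices : List Int) : List Int :=
  ((PySem.List.enumerate indices).foldl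
    (fun (s : Int × Int × Bool × List Int) (p : Int × Int) =>
      let prev := s.1; let lpi := s.2.1; let bad := s.2.2.1; let acc := s.2.2.2
      let index := p.1; let val := p.2
      if val > 0 then
        let acc :=
          if bad then
            let mean_value := if prev > 0 then PySem.Int.floordiv (prev + val) 2 else val
            acc ++ List.replicate (index - lpi - 1).toNat mean_value
          else acc
        (val, index, false, acc ++ [val])
      else (prev, lpi, true, acc))
    (0, 0, false, [])).2.2.2

-- ===== PORT B =====
-- pass 1: reversed-order foldl building nxt, then reverse (as in Source B);
-- pass 2: foldl over enumerate(zip(indices, nxt)) with state (prev, out).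
def interpolate_gaps_alt (indices : List Int) : List Int :=
  let s := indices.reverse.foldl
    (fun (s : Int × List Int) (v : Int) =>
      let following := if v > 0 then v else s.1
      (following, s.2 ++ [following])) (0, [])
  let nxt := s.2.reverse
  ((PySem.List.enumerate (indices.zip nxt)).foldl
    (fun (s : Int × List Int) (p : Int × Int × Int) =>
      let prev := s.1; let out := s.2
      let j := p.1; let v := p.2.1; let f := p.2.2
      if v > 0 then (v, out ++ [v])
      else if j > 0 ∧ f > 0 then
        (prev, out ++ [if prev > 0 then PySem.Int.floordiv (prev + f) 2 else f])
      else (prev, out))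
    (0, [])).2

-- ===== PRECONDITION & SPEC =====
def Spec_interpolate_gaps (indices : List Int) (out : List Int) : Prop := out = interpolate_gaps_alt indices
instance (indices : List Int) (out : List Int) : Decidable (Spec_interpolate_gaps indices out) := by unfold Spec_interpolate_gaps; infer_instance

-- ===== CLAIM (what is proved, stated in full; the proofs are below) =====
def Claim_equal_interpolate_gaps : Prop := ∀ (indices : List Int), Dom_interpolate_gaps indices → Spec_interpolate_gaps indices (interpolate_gaps indices)

-- ===== LEMMAS AND PROOFS =====

-- the shared midpoint/fill value
def fillv (prev v : Int) : Int := if prev > 0 then PySem.Int.floordiv (prev + v) 2 else v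

-- A's fold step as a named function (definitionally the lambda in port A)
def stepA (s : Int × Int × Bool × List Int) (p : Int × Int) : Int × Int × Bool × List Int :=
  let prev := s.1; let lpi := s.2.1; let bad := s.2.2.1; let acc := s.2.2.2
  let index := p.1; let val := p.2
  if val > 0 then
    let acc :=
      if bad then
        let mean_value := if prev > 0 then PySem.Int.floordiv (prev + val) 2 else val
        acc ++ List.replicate (index - lpi - 1).toNat mean_value
      else acc
    (val, index, false, acc ++ [val])
  else (prev, lpi, true, acc)

-- B's second-pass fold step as a named function (definitionally the lambda in port B)
def stepB (s : Int × List Int) (p : Int × Int × Int) : Int × List Int :=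
  let prev := s.1; let out := s.2
  let j := p.1; let v := p.2.1; let f := p.2.2
  if v > 0 then (v, out ++ [v])
  else if j > 0 ∧ f > 0 then
    (prev, out ++ [if prev > 0 then PySem.Int.floordiv (prev + f) 2 else f])
  else (prev, out)

-- B's first-pass fold step as a named function
def stepN (s : Int × List Int) (v : Int) : Int × List Int :=
  let following := if v > 0 then v else s.1
  (following, s.2 ++ [following])

-- structural form of the first pass: (first positive value of xs (0 if none), nxt list)
def buildNxt : List Int → Int × List Int
  | [] => (0, [])
  | v :: xs =>
    let r := buildNxt xs
    let f := if v > 0 then v else r.1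
    (f, f :: r.2)

-- A's loop in recursive, append-producing form
def loopG : List Int → Int → Int → Int → List Int
  | [], _, _, _ => []
  | x :: xs, j, prev, lpi =>
    if x > 0 then
      List.replicate (j - lpi - 1).toNat (fillv prev x) ++ x :: loopG xs (j + 1) x j
    else loopG xs (j + 1) prev lpi

-- B's second pass in recursive form (positions > 0)
def recB : List Int → List Int → Int → List Int
  | x :: xs, f :: fs, prev =>
    if x > 0 then x :: recB xs fs x
    else (if f > 0 then [fillv prev f] else []) ++ recB xs fs prev
  | _, _, _ => []

theorem buildNxt_rev (xs : List Int) :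
    xs.reverse.foldl stepN (0, []) = ((buildNxt xs).1, (buildNxt xs).2.reverse) := by
  induction xs with
  | nil => rfl
  | cons x xs ih =>
    rw [List.reverse_cons, List.foldl_append, ih]
    by_cases hx : x > 0 <;> simp [stepN, buildNxt, hx]

theorem foldA_eq (xs : List Int) (i prev lpi : Int) (bad : Bool) (acc : List Int)
    (h : bad = false → i - 1 ≤ lpi) :
    ((PySem.List.enumerate xs i).foldl stepA (prev, lpi, bad, acc)).2.2.2
      = acc ++ loopG xs i prev lpi := by
  induction xs generalizing i prev lpi bad acc with
  | nil => simp [PySem.List.enumerate_nil, loopG]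
  | cons x xs ih =>
    rw [PySem.List.enumerate_cons, List.foldl_cons]
    by_cases hx : x > 0
    · cases bad with
      | false =>
        have h1 : stepA (prev, lpi, false, acc) (i, x) = (x, i, false, acc ++ [x]) := by
          simp [stepA, hx]
        have hz : (i - lpi - 1).toNat = 0 := by have := h rfl; omega
        rw [h1, ih (i + 1) x i false (acc ++ [x]) (by intro _; omega), loopG]
        simp [hx, hz]
      | true =>
        have h1 : stepA (prev, lpi, true, acc) (i, x)
            = (x, i, false,
               (acc ++ List.replicate (i - lpi - 1).toNat (fillv prev x)) ++ [x]) := by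
          simp [stepA, fillv, hx]
        rw [h1, ih (i + 1) x i false _ (by intro _; omega), loopG]
        simp [hx, List.append_assoc]
    · have h1 : stepA (prev, lpi, bad, acc) (i, x) = (prev, lpi, true, acc) := by
        simp [stepA, hx]
      rw [h1, ih (i + 1) prev lpi true acc (by simp), loopG]
      simp [hx]

theorem foldB_eq (xs fs : List Int) (i prev : Int) (acc : List Int) (hi : 0 < i) :
    ((PySem.List.enumerate (xs.zip fs) i).foldl stepB (prev, acc)).2
      = acc ++ recB xs fs prev := by
  induction xs generalizing fs i prev acc with
  | nil => simp [PySem.List.enumerate_nil, recB]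
  | cons x xs ih =>
    cases fs with
    | nil => simp [PySem.List.enumerate_nil, recB]
    | cons f fs =>
      rw [List.zip_cons_cons, PySem.List.enumerate_cons, List.foldl_cons]
      by_cases hx : x > 0
      · have h1 : stepB (prev, acc) (i, x, f) = (x, acc ++ [x]) := by simp [stepB, hx]
        rw [h1, ih fs (i + 1) x (acc ++ [x]) (by omega), recB]
        simp [hx]
      · by_cases hf : f > 0
        · have h1 : stepB (prev, acc) (i, x, f) = (prev, acc ++ [fillv prev f]) := by
            simp [stepB, fillv, hx, hf, hi]
          rw [h1, ih fs (i + 1) prev _ (by omega), recB]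
          simp [hx, hf]
        · have h1 : stepB (prev, acc) (i, x, f) = (prev, acc) := by
            simp [stepB, hx, hf]
          rw [h1, ih fs (i + 1) prev acc (by omega), recB]
          simp [hx, hf]

theorem buildNxt_cons (x : Int) (xs : List Int) :
    buildNxt (x :: xs)
      = (if x > 0 then x else (buildNxt xs).1,
         (if x > 0 then x else (buildNxt xs).1) :: (buildNxt xs).2) := rfl

-- main bridge: A's recursive loop = pending midpoint block + B's per-position recursion
theorem loopG_eq_recB (xs : List Int) (j prev lpi : Int) (h : lpi ≤ j - 1) :
    loopG xs j prev lpi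
      = (if (buildNxt xs).1 > 0 then
           List.replicate (j - 1 - lpi).toNat (fillv prev (buildNxt xs).1)
         else []) ++ recB xs (buildNxt xs).2 prev := by
  induction xs generalizing j prev lpi with
  | nil => simp [loopG, buildNxt, recB]
  | cons x xs ih =>
    rw [buildNxt_cons]
    by_cases hx : x > 0
    · have hrec := ih (j + 1) x j (by omega)
      have hz : (j + 1 - 1 - j).toNat = 0 := by omega
      rw [hz] at hrec
      simp only [List.replicate_zero, ite_self, List.nil_append] at hrec
      have he : (j - lpi - 1).toNat = (j - 1 - lpi).toNat := by omega
      simp [loopG, recB, hx, hrec, he]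
    · have hrec := ih (j + 1) prev lpi (by omega)
      by_cases hf : (buildNxt xs).1 > 0
      · have hr : (j + 1 - 1 - lpi).toNat = (j - 1 - lpi).toNat + 1 := by omega
        rw [hr, List.replicate_succ'] at hrec
        simp [loopG, recB, hx, hf, hrec, fillv]
      · simp [loopG, recB, hx, hf, hrec]

-- ===== VERDICT (by name: the statement is the Claim_ definition above) =====
theorem interpolate_gaps_spec : Claim_equal_interpolate_gaps := by
  intro indices _
  show interpolate_gaps indices = interpolate_gaps_alt indices
  have hA : interpolate_gaps indices
      = ((PySem.List.enumerate indices).foldl stepA (0, 0, false, [])).2.2.2 := rfl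
  have hB : interpolate_gaps_alt indices
      = ((PySem.List.enumerate (indices.zip
            ((indices.reverse.foldl stepN (0, [])).2.reverse))).foldl stepB (0, [])).2 := rfl
  rw [hA, hB, buildNxt_rev, List.reverse_reverse,
      foldA_eq indices 0 0 0 false [] (by intro _; omega)]
  cases indices with
  | nil => simp [loopG, PySem.List.enumerate_nil, buildNxt]
  | cons x xs =>
    have hmain : ∀ p : Int, loopG xs 1 p 0 = recB xs (buildNxt xs).2 p := by
      intro p
      have h := loopG_eq_recB xs 1 p 0 (by omega)
      simpa using h
    rw [buildNxt_cons]
    by_cases hx : x > 0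
    · simp only [if_pos hx, List.zip_cons_cons, PySem.List.enumerate_cons, List.foldl_cons]
      have h1 : stepB ((0 : Int), ([] : List Int)) (0, x, x) = (x, [x]) := by
        simp [stepB, hx]
      rw [h1, foldB_eq xs (buildNxt xs).2 (0 + 1) x [x] (by omega)]
      simp [loopG, hx, hmain]
    · simp only [if_neg hx, List.zip_cons_cons, PySem.List.enumerate_cons, List.foldl_cons]
      have h1 : stepB ((0 : Int), ([] : List Int)) (0, x, (buildNxt xs).1) = (0, []) := by
        simp [stepB, hx]
      rw [h1, foldB_eq xs (buildNxt xs).2 (0 + 1) 0 [] (by omega)]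
      simp [loopG, hx, hmain]
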